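-- pv_equiv track=rewrite | github.com/07medulla/INVARIANT | scripts/sheets_ingest.py | validation_report
-- ===== SOURCE A (Python) =====
-- from typing import Dict, List, Tuple
--
-- def validation_report(records: List[Dict[str, str]]) -> Dict[str, Dict[str, int]]:
--     report: Dict[str, Dict[str, int]] = {}
--     for record in records:
--         tab = record.get("sheet_tab", "unknown")
--         stats = report.setdefault(tab, {"missing_location": 0, "missing_phone": 0, "missing_email": 0})
--         if not record.get("location"):
--             stats["missing_location"] += 1
--         if not record.get("phone"):
--             stats["missing_phone"] += 1
--         if not record.get("email"):
--             stats["missing_email"] += 1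
--     return report
-- ===== SOURCE B (Python) =====
-- from typing import Dict, List
--
-- def validation_report(records: List[Dict[str, str]]) -> Dict[str, Dict[str, int]]:
--     groups: Dict[str, List[Dict[str, str]]] = {}
--     for record in records:
--         groups.setdefault(record.get("sheet_tab", "unknown"), []).append(record)
--     return {
--         tab: {
--             "missing_location": sum(1 for r in group if not r.get("location")),
--             "missing_phone": sum(1 for r in group if not r.get("phone")),
--             "missing_email": sum(1 for r in group if not r.get("email")),
--         }
--         for tab, group in groups.items()
--     }
-- ===== Notes on version B (the rewrite author's own statement) =====
-- stated objective: alternative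
-- what changed: A interleaves grouping and counting in one pass that mutates per-tab counters via setdefault; B first partitions the records into a tab-keyed grouping dict and then builds each tab's stats in a second pass with sum(1 for ...) comprehensions.
import Mathlib
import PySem

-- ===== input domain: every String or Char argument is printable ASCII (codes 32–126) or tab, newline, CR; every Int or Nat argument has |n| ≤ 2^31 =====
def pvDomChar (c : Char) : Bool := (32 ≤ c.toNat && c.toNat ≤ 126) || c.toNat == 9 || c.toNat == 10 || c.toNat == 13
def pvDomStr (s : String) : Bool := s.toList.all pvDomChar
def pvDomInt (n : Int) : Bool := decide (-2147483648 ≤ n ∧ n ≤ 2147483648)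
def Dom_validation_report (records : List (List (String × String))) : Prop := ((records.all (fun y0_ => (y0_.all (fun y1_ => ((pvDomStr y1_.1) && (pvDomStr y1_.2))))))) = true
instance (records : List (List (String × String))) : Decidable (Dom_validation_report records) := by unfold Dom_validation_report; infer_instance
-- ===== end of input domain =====

-- B replaces A's single mutate-as-you-go pass by a two-phase decomposition (partition by tab, then count per group); alternative, not faster.

-- ===== PORT A =====
-- record.get(k): a record is an association list; first match, as Python's dict lookup
def vrGet (record : List (String × String)) (k : String) : Option String :=
  (PySem.Dict.mk record).get? k

-- 'not record.get(k)': true iff the key is absent or its value is the empty string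
def vrMissing (record : List (String × String)) (k : String) : Bool :=
  match vrGet record k with
  | none => true
  | some s => s == ""

def vrDefaultStats : PySem.Dict String Int :=
  PySem.Dict.mk [("missing_location", 0), ("missing_phone", 0), ("missing_email", 0)]

-- body of A's loop: setdefault, then the three conditional in-place increments
def vrStepA (report : PySem.Dict String (PySem.Dict String Int))
    (record : List (String × String)) : PySem.Dict String (PySem.Dict String Int) :=
  let tab := (vrGet record "sheet_tab").getD "unknown"
  let report := report.setdefault tab vrDefaultStats
  let report := if vrMissing record "location"
    then report.modify tab PySem.Dict.empty (fun s => s.modify "missing_location" 0 (· + 1)) else report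
  let report := if vrMissing record "phone"
    then report.modify tab PySem.Dict.empty (fun s => s.modify "missing_phone" 0 (· + 1)) else report
  if vrMissing record "email"
    then report.modify tab PySem.Dict.empty (fun s => s.modify "missing_email" 0 (· + 1)) else report

def validation_report (records : List (List (String × String))) : List (String × List (String × Int)) :=
  ((records.foldl vrStepA PySem.Dict.empty).items).map (fun p => (p.1, p.2.items))

-- ===== PORT B =====
-- second pass of Source B: the stats dict literal for one tab's group, counted by comprehensions
def vrStats (group : List (List (String × String))) : List (String × Int) :=
  [("missing_location", (group.countP (fun r => vrMissing r "location") : Int)),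
   ("missing_phone",    (group.countP (fun r => vrMissing r "phone") : Int)),
   ("missing_email",    (group.countP (fun r => vrMissing r "email") : Int))]

def validation_report_alt (records : List (List (String × String))) : List (String × List (String × Int)) :=
  let groups := records.foldl
    (fun g r => g.modify ((vrGet r "sheet_tab").getD "unknown") [] (· ++ [r]))
    (PySem.Dict.empty : PySem.Dict String (List (List (String × String))))
  groups.items.map (fun p => (p.1, vrStats p.2))

-- ===== PRECONDITION & SPEC =====
def Spec_validation_report (records : List (List (String × String))) (out : List (String × List (String × Int))) : Prop := out = validation_report_alt records
instance (records : List (List (String × String))) (out : List (String × List (String × Int))) : Decidable (Spec_validation_report records out) := by unfold Spec_validation_report; infer_instance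

-- ===== CLAIM (what is proved, stated in full; the proofs are below) =====
def Claim_equal_validation_report : Prop := ∀ (records : List (List (String × String))), Dom_validation_report records → Spec_validation_report records (validation_report records)

-- ===== LEMMAS AND PROOFS =====

-- map a function over the values of a dict, keeping keys and order
def vrMapVal (F : List (List (String × String)) → PySem.Dict String Int)
    (g : PySem.Dict String (List (List (String × String)))) : PySem.Dict String (PySem.Dict String Int) :=
  PySem.Dict.mk (g.items.map (fun p => (p.1, F p.2)))

theorem vrMapVal_contains (F) (g : PySem.Dict String (List (List (String × String)))) (k : String) :
    (vrMapVal F g).contains k = g.contains k := by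
  simp [vrMapVal, PySem.Dict.contains, List.any_map, Function.comp_def]

theorem vrMapVal_get? (F) (g : PySem.Dict String (List (List (String × String)))) (k : String) :
    (vrMapVal F g).get? k = (g.get? k).map F := by
  simp only [vrMapVal, PySem.Dict.get?]
  induction g.items with
  | nil => simp
  | cons p rest ih =>
    by_cases h : p.1 == k
    · simp [List.find?, h]
    · simpa [List.find?, h] using ih

theorem vrMapVal_keys (F) (g : PySem.Dict String (List (String × String) |> List)) :
    (vrMapVal F g).keys = g.keys := by
  simp [vrMapVal, PySem.Dict.keys]

theorem vrMapVal_insert (F) (g : PySem.Dict String (List (List (String × String)))) (k : String) (v) :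
    vrMapVal F (g.insert k v) = (vrMapVal F g).insert k (F v) := by
  simp only [PySem.Dict.insert, vrMapVal_contains]
  by_cases h : g.contains k
  · simp only [h, if_true, vrMapVal, List.map_map]
    congr 1
    apply List.map_congr_left
    intro p _
    by_cases hp : p.1 = k <;> simp [hp]
  · simp [h, vrMapVal]

-- inserting a key's own current value is a no-op (keys unique)
theorem vr_insert_self_value (d : PySem.Dict String (PySem.Dict String Int)) (k : String) (s)
    (hnd : d.keys.Nodup) (h : d.get? k = some s) : d.insert k s = d := by
  have hc : d.contains k = true := by
    rw [PySem.Dict.contains_eq_isSome_get?, h]; rfl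
  apply PySem.Dict.ext
  rw [PySem.Dict.items_insert_of_contains _ _ hc]
  have hm : (k, s) ∈ d.items := PySem.Dict.mem_items_of_get?_eq_some d h
  apply List.map_congr_left ?_ |>.trans (List.map_id _)
  intro p hp
  by_cases hpk : p.1 == k
  · have hk : p.1 = k := by simpa using hpk
    have : p.2 = s := by
      have := PySem.Dict.get?_of_mem_items d (by simpa using hp) hnd
      rw [hk, h] at this; simpa using this.symm
    simp only [id_eq, ← hk, ← this, beq_self_eq_true, if_true]
  · simp [hpk]

-- collapsing 'insert then modify at the same key'
theorem vr_modify_insert (d : PySem.Dict String (PySem.Dict String Int)) (k : String) (s f) :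
    (d.insert k s).modify k PySem.Dict.empty f = d.insert k (f s) := by
  simp [PySem.Dict.modify, PySem.Dict.insert_insert_self,
    PySem.Dict.getD_eq_get?_getD, PySem.Dict.get?_insert_self]

def vrC1 (r : List (String × String)) (s : PySem.Dict String Int) : PySem.Dict String Int :=
  if vrMissing r "location" then s.modify "missing_location" 0 (· + 1) else s
def vrC2 (r : List (String × String)) (s : PySem.Dict String Int) : PySem.Dict String Int :=
  if vrMissing r "phone" then s.modify "missing_phone" 0 (· + 1) else s
def vrC3 (r : List (String × String)) (s : PySem.Dict String Int) : PySem.Dict String Int :=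
  if vrMissing r "email" then s.modify "missing_email" 0 (· + 1) else s

def vrD1 (r : List (String × String)) (k : String) (d : PySem.Dict String (PySem.Dict String Int)) :
    PySem.Dict String (PySem.Dict String Int) :=
  if vrMissing r "location" then d.modify k PySem.Dict.empty (fun s => s.modify "missing_location" 0 (· + 1)) else d
def vrD2 (r : List (String × String)) (k : String) (d : PySem.Dict String (PySem.Dict String Int)) :
    PySem.Dict String (PySem.Dict String Int) :=
  if vrMissing r "phone" then d.modify k PySem.Dict.empty (fun s => s.modify "missing_phone" 0 (· + 1)) else d
def vrD3 (r : List (String × String)) (k : String) (d : PySem.Dict String (PySem.Dict String Int)) :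
    PySem.Dict String (PySem.Dict String Int) :=
  if vrMissing r "email" then d.modify k PySem.Dict.empty (fun s => s.modify "missing_email" 0 (· + 1)) else d

-- A's three conditional in-place increments act on the tab's stats value
theorem vr_chain (d : PySem.Dict String (PySem.Dict String Int)) (k : String) (s r)
    (hnd : d.keys.Nodup) (h : d.get? k = some s) :
    vrD3 r k (vrD2 r k (vrD1 r k d)) = d.insert k (vrC3 r (vrC2 r (vrC1 r s))) := by
  have hd : d.modify k PySem.Dict.empty = fun f => d.insert k (f s) := by
    funext f
    simp [PySem.Dict.modify, PySem.Dict.getD_eq_get?_getD, h]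
  simp only [vrD1, vrD2, vrD3, vrC1, vrC2, vrC3]
  split_ifs with h1 h2 h3 <;>
    simp [hd, vr_modify_insert, vr_insert_self_value d k s hnd h]

-- the stats value of a group, as B computes it
def vrStatsD (group : List (List (String × String))) : PySem.Dict String Int :=
  PySem.Dict.mk (vrStats group)

theorem vr_stats_append (grp : List (List (String × String))) (r) :
    vrStatsD (grp ++ [r]) = vrC3 r (vrC2 r (vrC1 r (vrStatsD grp))) := by
  simp only [vrStatsD, vrStats, vrC1, vrC2, vrC3, List.countP_append]
  cases h1 : vrMissing r "location" <;> cases h2 : vrMissing r "phone" <;>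
    cases h3 : vrMissing r "email" <;>
    simp [PySem.Dict.modify, PySem.Dict.insert, PySem.Dict.getD, PySem.Dict.get?,
      PySem.Dict.contains, List.find?, h1, h2, h3]

theorem vr_default_stats : vrDefaultStats = vrStatsD [] := by
  simp [vrDefaultStats, vrStatsD, vrStats, List.countP_nil]

-- one record: A's loop body on the mapped dict = map of B's grouping step
theorem vr_step (g : PySem.Dict String (List (List (String × String)))) (r)
    (hnd : g.keys.Nodup) :
    vrStepA (vrMapVal vrStatsD g) r
      = vrMapVal vrStatsD (g.modify ((vrGet r "sheet_tab").getD "unknown") [] (· ++ [r])) := by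
  have main : ∀ t : String,
      vrD3 r t (vrD2 r t (vrD1 r t ((vrMapVal vrStatsD g).setdefault t vrDefaultStats)))
        = vrMapVal vrStatsD (g.modify t [] (· ++ [r])) := by
    intro t
    have hndm : (vrMapVal vrStatsD g).keys.Nodup := by rw [vrMapVal_keys]; exact hnd
    rw [PySem.Dict.modify, vrMapVal_insert]
    by_cases hc : g.contains t
    · obtain ⟨grp, hg⟩ : ∃ grp, g.get? t = some grp := by
        have := PySem.Dict.contains_eq_isSome_get? (d := g) (k := t)
        rw [hc] at this
        cases hgo : g.get? t with
        | none => rw [hgo] at this; simp at this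
        | some v => exact ⟨v, rfl⟩
      have hgD : g.getD t [] = grp := PySem.Dict.getD_of_get?_eq_some g [] hg
      have hmg : (vrMapVal vrStatsD g).get? t = some (vrStatsD grp) := by
        rw [vrMapVal_get?, hg]; rfl
      rw [PySem.Dict.setdefault_of_contains _ _ (by rw [vrMapVal_contains]; exact hc)]
      rw [vr_chain _ _ _ r hndm hmg, hgD, vr_stats_append]
    · have hgD : g.getD t [] = [] := PySem.Dict.getD_of_not_contains g [] (by simpa using hc)
      rw [PySem.Dict.setdefault_of_not_contains _ _ (by rw [vrMapVal_contains]; simpa using hc)]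
      have hnd' : ((vrMapVal vrStatsD g).insert t vrDefaultStats).keys.Nodup :=
        PySem.Dict.nodup_keys_insert _ _ _ hndm
      rw [vr_chain _ _ _ r hnd' (PySem.Dict.get?_insert_self _ _ _),
        PySem.Dict.insert_insert_self, vr_default_stats, ← vr_stats_append, hgD]
  exact main ((vrGet r "sheet_tab").getD "unknown")

theorem vr_nodup_step (g : PySem.Dict String (List (List (String × String)))) (t v) :
    g.keys.Nodup → (g.insert t v).keys.Nodup := PySem.Dict.nodup_keys_insert g t v

theorem vr_fold (records : List (List (String × String)))
    (g : PySem.Dict String (List (List (String × String)))) (hnd : g.keys.Nodup) :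
    records.foldl vrStepA (vrMapVal vrStatsD g)
      = vrMapVal vrStatsD (records.foldl
          (fun g r => g.modify ((vrGet r "sheet_tab").getD "unknown") [] (· ++ [r])) g) := by
  induction records generalizing g with
  | nil => rfl
  | cons r rest ih =>
    simp only [List.foldl_cons, vr_step g r hnd]
    exact ih _ (vr_nodup_step _ _ _ hnd)

-- ===== VERDICT (by name: the statement is the Claim_ definition above) =====
theorem validation_report_spec : Claim_equal_validation_report := by
  intro records _
  unfold Spec_validation_report validation_report validation_report_alt
  have h0 : (PySem.Dict.empty : PySem.Dict String (PySem.Dict String Int))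
      = vrMapVal vrStatsD PySem.Dict.empty := rfl
  rw [h0, vr_fold records PySem.Dict.empty (by simp [PySem.Dict.keys, PySem.Dict.empty])]
  simp [vrMapVal, vrStatsD, List.map_map, Function.comp]
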